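-- pv_equiv track=rewrite | github.com/zihaog0724/algorithm_exercise | sort/small_sum_merge_sort.py | mergeSum
-- ===== SOURCE A (Python) =====
-- def mergeSum(arr, left, mid, right):
--     l = left
--     r = mid+1
--     Sum = 0
--     new_arr = []
--     while l <= mid and r <= right:
--         if arr[l] < arr[r]:
--             Sum += arr[l] * (right - r + 1)
--             new_arr.append(arr[l])
--             l += 1
--         else:
--             new_arr.append(arr[r])
--             r += 1
--
--     while l <= mid:
--         new_arr.append(arr[l])
--         l += 1
--
--     while r <= right:
--         new_arr.append(arr[r])
--         r += 1
--
--     for i in range(len(new_arr)):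
--         arr[left+i] = new_arr[i]
--
--     return Sum
-- ===== SOURCE B (Python) =====
-- def mergeSum(arr, left, mid, right):
--     # Staged decomposition with a different sum mechanism: one unified loop
--     # tags the merged stream with its origin (left/right half); the small-sum
--     # is then computed by a prefix-sum credit: keep a running sum of left-half
--     # elements seen so far and add it whenever a right-half element appears.
--     tagged = []
--     l, r = left, mid + 1
--     while l <= mid or r <= right:
--         if r > right or (l <= mid and arr[l] < arr[r]):
--             tagged.append((arr[l], True))
--             l += 1
--         else:
--             tagged.append((arr[r], False))
--             r += 1
--     total = 0
--     running = 0
--     for val, from_left in tagged: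
--         if from_left:
--             running += val
--         else:
--             total += running
--     for i in range(len(tagged)):
--         arr[left + i] = tagged[i][0]
--     return total
-- ===== Notes on version B (the rewrite author's own statement) =====
-- stated objective: alternative
-- what changed: Replaces A's fused three-loop merge that weights each taken left element by the count of remaining right elements (Sum += arr[l]*(right-r+1)) with a staged decomposition and a different sum mechanism: one unified loop with a single disjunctive condition tags the merged stream with its origin, and a separate prefix-sum pass credits the running sum of left-half elements at each right-half element; no remaining-count multiplication occurs anywhere.
import Mathlib
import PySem

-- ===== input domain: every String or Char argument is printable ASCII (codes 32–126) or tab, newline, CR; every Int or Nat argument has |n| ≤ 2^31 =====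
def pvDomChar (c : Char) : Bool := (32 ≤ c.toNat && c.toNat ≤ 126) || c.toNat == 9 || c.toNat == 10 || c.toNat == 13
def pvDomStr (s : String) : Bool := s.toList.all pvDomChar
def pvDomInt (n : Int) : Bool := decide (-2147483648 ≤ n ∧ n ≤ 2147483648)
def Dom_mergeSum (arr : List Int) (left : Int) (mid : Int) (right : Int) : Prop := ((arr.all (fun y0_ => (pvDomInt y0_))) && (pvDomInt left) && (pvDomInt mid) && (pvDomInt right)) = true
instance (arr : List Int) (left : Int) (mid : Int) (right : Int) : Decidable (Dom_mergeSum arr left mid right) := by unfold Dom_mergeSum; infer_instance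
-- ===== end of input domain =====

-- B replaces A's fused three-loop merge (with its per-step Sum += arr[l]*(right-r+1) weighting)
-- by a staged decomposition: one unified origin-tagging loop, then a separate prefix-sum pass
-- that credits the running sum of left elements at each right element. Equivalence is claimed
-- about the RETURN value only — both Pythons also mutate arr[left..right] in place (identically).
-- Loops are ported with a Nat fuel that only makes the recursion structural; every Python
-- loop condition is kept and the fuel is always at least the number of iterations.

-- ===== PORT A =====
-- the first while loop: state (l, r, Sum, new_arr); arr[l]/arr[r] are in range under
-- Pre_ (out of range would be a Python IndexError), ported as pyGetD _ _ 0
def pvMergeLoopA (arr : List Int) (mid right : Int) :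
    Nat → Int → Int → Int → List Int → Int × Int × Int × List Int
  | 0, l, r, Sum, na => (l, r, Sum, na)
  | fuel + 1, l, r, Sum, na =>
    if l ≤ mid ∧ r ≤ right then
      if PySem.List.pyGetD arr l 0 < PySem.List.pyGetD arr r 0 then
        pvMergeLoopA arr mid right fuel (l + 1) r
          (Sum + PySem.List.pyGetD arr l 0 * (right - r + 1))
          (na ++ [PySem.List.pyGetD arr l 0])
      else
        pvMergeLoopA arr mid right fuel l (r + 1) Sum (na ++ [PySem.List.pyGetD arr r 0])
    else (l, r, Sum, na)

-- 'while l <= mid: new_arr.append(arr[l]); l += 1' and its r-twin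
def pvCopyTailA (arr : List Int) (hi : Int) : Nat → Int → List Int → List Int
  | 0, _, na => na
  | fuel + 1, i, na =>
    if i ≤ hi then pvCopyTailA arr hi fuel (i + 1) (na ++ [PySem.List.pyGetD arr i 0]) else na

def mergeSum (arr : List Int) (left : Int) (mid : Int) (right : Int) : Int :=
  let st := pvMergeLoopA arr mid right ((mid + 1 - left).toNat + (right - mid).toNat)
    left (mid + 1) 0 []
  let na := pvCopyTailA arr mid (mid + 1 - st.1).toNat st.1 st.2.2.2
  let _na := pvCopyTailA arr right (right + 1 - st.2.1).toNat st.2.1 na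
  -- 'for i in range(len(new_arr)): arr[left+i] = new_arr[i]' only mutates arr in place;
  -- it does not affect the returned Sum, which the claim is about
  st.2.2.1

-- ===== PORT B =====
-- Source B's unified tagging loop: 'while l <= mid or r <= right', one disjunctive branch
-- condition 'r > right or (l <= mid and arr[l] < arr[r])'; state (l, r, tagged)
def pvTagLoopB (arr : List Int) (mid right : Int) :
    Nat → Int → Int → List (Int × Bool) → List (Int × Bool)
  | 0, _, _, tagged => tagged
  | fuel + 1, l, r, tagged =>
    if l ≤ mid ∨ r ≤ right then
      if right < r ∨ (l ≤ mid ∧ PySem.List.pyGetD arr l 0 < PySem.List.pyGetD arr r 0) then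
        pvTagLoopB arr mid right fuel (l + 1) r (tagged ++ [(PySem.List.pyGetD arr l 0, true)])
      else
        pvTagLoopB arr mid right fuel l (r + 1) (tagged ++ [(PySem.List.pyGetD arr r 0, false)])
    else tagged

-- Source B's second pass: state (total, running); a left element grows running,
-- a right element credits running to total
def pvCreditB (acc : Int × Int) (p : Int × Bool) : Int × Int :=
  if p.2 then (acc.1, acc.2 + p.1) else (acc.1 + acc.2, acc.2)

def mergeSum_alt (arr : List Int) (left : Int) (mid : Int) (right : Int) : Int :=
  let tagged := pvTagLoopB arr mid right ((mid + 1 - left).toNat + (right - mid).toNat)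
    left (mid + 1) []
  let st := tagged.foldl pvCreditB (0, 0)
  -- 'for i in range(len(tagged)): arr[left+i] = tagged[i][0]' only mutates arr in place;
  -- it does not affect the returned total, which the claim is about
  st.1

-- ===== PRECONDITION & SPEC =====
-- Pre_ is exactly the inputs on which the Python A returns (no IndexError): every index A
-- reads (the integer intervals [left,mid] and [mid+1,right]) and every index A writes back
-- (left .. left+len(new_arr)-1) is a valid Python index of arr; negative indices counting from the end are admitted.
def Pre_mergeSum (arr : List Int) (left : Int) (mid : Int) (right : Int) : Prop :=
  (left ≤ mid → -(arr.length : Int) ≤ left ∧ mid < (arr.length : Int)) ∧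
  (mid + 1 ≤ right → -(arr.length : Int) ≤ mid + 1 ∧ right < (arr.length : Int)) ∧
  (left ≤ mid ∨ mid + 1 ≤ right →
    -(arr.length : Int) ≤ left ∧
      left + (max (mid - left + 1) 0 + max (right - mid) 0) - 1 < (arr.length : Int))
instance (arr : List Int) (left : Int) (mid : Int) (right : Int) : Decidable (Pre_mergeSum arr left mid right) := by
  unfold Pre_mergeSum; infer_instance

def pvWitness_mergeSum : List Int × Int × Int × Int := ([1, 3, 2, 4], 0, 1, 3)

def Spec_mergeSum (arr : List Int) (left : Int) (mid : Int) (right : Int) (out : Int) : Prop := out = mergeSum_alt arr left mid right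
instance (arr : List Int) (left : Int) (mid : Int) (right : Int) (out : Int) : Decidable (Spec_mergeSum arr left mid right out) := by unfold Spec_mergeSum; infer_instance

-- ===== CLAIM (what is proved, stated in full; the proofs are below) =====
def Claim_equal_mergeSum : Prop := ∀ (arr : List Int) (left : Int) (mid : Int) (right : Int), Dom_mergeSum arr left mid right → Pre_mergeSum arr left mid right → Spec_mergeSum arr left mid right (mergeSum arr left mid right)

-- ===== LEMMAS AND PROOFS =====

-- appending one tagged element to the credit fold
theorem pvCredit_append (xs : List (Int × Bool)) (p : Int × Bool) :
    (xs ++ [p]).foldl pvCreditB (0, 0) = pvCreditB (xs.foldl pvCreditB (0, 0)) p := by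
  rw [List.foldl_append]; rfl

-- A's phase-1 Sum accumulator is a pure offset: shifting it by d shifts the result by d
-- (and the result's Sum component does not depend on the new_arr accumulator)
theorem pvMergeLoopA_sum_shift (arr : List Int) (mid right : Int) :
    ∀ (fuel : Nat) (l r Sum d : Int) (na na' : List Int),
      (pvMergeLoopA arr mid right fuel l r (Sum + d) na').2.2.1 =
        (pvMergeLoopA arr mid right fuel l r Sum na).2.2.1 + d := by
  intro fuel
  induction fuel with
  | zero => intro l r Sum d na na'; rfl
  | succ fuel ih =>
    intro l r Sum d na na'
    by_cases hg : l ≤ mid ∧ r ≤ right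
    · by_cases hc : PySem.List.pyGetD arr l 0 < PySem.List.pyGetD arr r 0
      · simp only [pvMergeLoopA]
        rw [if_pos hg, if_pos hc, if_pos hg, if_pos hc]
        rw [show Sum + d + PySem.List.pyGetD arr l 0 * (right - r + 1) =
            (Sum + PySem.List.pyGetD arr l 0 * (right - r + 1)) + d by ring]
        exact ih _ _ _ _ _ _
      · simp only [pvMergeLoopA]
        rw [if_pos hg, if_neg hc, if_pos hg, if_neg hc]
        exact ih _ _ _ _ _ _
    · simp only [pvMergeLoopA]; rw [if_neg hg, if_neg hg]

-- A's phase-1 loop exits as soon as its conjunctive guard fails, whatever the fuel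
theorem pvMergeLoopA_exit (arr : List Int) (mid right : Int) (fuel : Nat)
    (l r Sum : Int) (na : List Int) (h : ¬(l ≤ mid ∧ r ≤ right)) :
    pvMergeLoopA arr mid right fuel l r Sum na = (l, r, Sum, na) := by
  cases fuel with
  | zero => rfl
  | succ fuel => simp only [pvMergeLoopA]; rw [if_neg h]

-- MAIN INVARIANT. Running B's tagging loop from (l, r) on an already-built prefix 'tagged'
-- and then crediting gives: the prefix's total, plus the prefix's running sum once for every
-- still-pending right index, plus whatever A's phase-1 loop accumulates from (l, r).
theorem pvTag_credit_eq_loopA (arr : List Int) (mid right : Int) :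
    ∀ (fuel : Nat) (l r : Int) (tagged : List (Int × Bool)) (Sum : Int) (na : List Int),
      (mid + 1 - l).toNat + (right + 1 - r).toNat ≤ fuel →
      ((pvTagLoopB arr mid right fuel l r tagged).foldl pvCreditB (0, 0)).1 =
        (tagged.foldl pvCreditB (0, 0)).1
          + (tagged.foldl pvCreditB (0, 0)).2 * (((right + 1 - r).toNat : Int))
          + ((pvMergeLoopA arr mid right fuel l r Sum na).2.2.1 - Sum) := by
  intro fuel
  induction fuel with
  | zero =>
    intro l r tagged Sum na hfuel
    have hl : ¬ l ≤ mid := by omega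
    have hr : ¬ r ≤ right := by omega
    simp only [pvTagLoopB, pvMergeLoopA]
    have : ((right + 1 - r).toNat : Int) = 0 := by omega
    rw [this]; ring
  | succ fuel ih =>
    intro l r tagged Sum na hfuel
    by_cases hg : l ≤ mid ∨ r ≤ right
    · by_cases hc : right < r ∨ (l ≤ mid ∧ PySem.List.pyGetD arr l 0 < PySem.List.pyGetD arr r 0)
      · -- B takes a left element
        have hl : l ≤ mid := by rcases hc with h | h; · omega
                                rcases hg with h' | h'; · exact h'
                                exact h.1
        have hB : pvTagLoopB arr mid right (fuel + 1) l r tagged =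
            pvTagLoopB arr mid right fuel (l + 1) r
              (tagged ++ [(PySem.List.pyGetD arr l 0, true)]) := by
          simp only [pvTagLoopB]; rw [if_pos hg, if_pos hc]
        rw [hB, ih (l + 1) r _ Sum na (by omega)]
        rw [pvCredit_append]
        by_cases hr : r ≤ right
        · -- A's loop also takes the left element (its comparison branch fires)
          have hcmp : PySem.List.pyGetD arr l 0 < PySem.List.pyGetD arr r 0 := by
            rcases hc with h | h; · omega
            exact h.2
          have hA : pvMergeLoopA arr mid right (fuel + 1) l r Sum na =
              pvMergeLoopA arr mid right fuel (l + 1) r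
                (Sum + PySem.List.pyGetD arr l 0 * (right - r + 1))
                (na ++ [PySem.List.pyGetD arr l 0]) := by
            simp only [pvMergeLoopA]; rw [if_pos ⟨hl, hr⟩, if_pos hcmp]
          rw [hA, pvMergeLoopA_sum_shift arr mid right fuel (l + 1) r Sum
            (PySem.List.pyGetD arr l 0 * (right - r + 1)) na
            (na ++ [PySem.List.pyGetD arr l 0])]
          simp only [pvCreditB, reduceIte]
          have : ((right + 1 - r).toNat : Int) = right - r + 1 := by omega
          rw [this]; ring
        · -- A's loop has already exited (r > right); the pending-right count is 0
          have hA1 : pvMergeLoopA arr mid right (fuel + 1) l r Sum na = (l, r, Sum, na) :=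
            pvMergeLoopA_exit _ _ _ _ _ _ _ _ (by omega)
          have hA2 : pvMergeLoopA arr mid right fuel (l + 1) r Sum na = (l + 1, r, Sum, na) :=
            pvMergeLoopA_exit _ _ _ _ _ _ _ _ (by omega)
          rw [hA1, hA2]
          simp only [pvCreditB, reduceIte]
          have : ((right + 1 - r).toNat : Int) = 0 := by omega
          rw [this]; ring
      · -- B takes a right element
        have hr : r ≤ right := by omega
        have hB : pvTagLoopB arr mid right (fuel + 1) l r tagged =
            pvTagLoopB arr mid right fuel l (r + 1)
              (tagged ++ [(PySem.List.pyGetD arr r 0, false)]) := by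
          simp only [pvTagLoopB]; rw [if_pos hg, if_neg hc]
        have hcnt : ((right + 1 - r).toNat : Int) = ((right + 1 - (r + 1)).toNat : Int) + 1 := by
          omega
        by_cases hl : l ≤ mid
        · -- A's loop matches (guard holds, its comparison branch fails)
          have hcmp : ¬ PySem.List.pyGetD arr l 0 < PySem.List.pyGetD arr r 0 := by tauto
          have hA : pvMergeLoopA arr mid right (fuel + 1) l r Sum na =
              pvMergeLoopA arr mid right fuel l (r + 1) Sum
                (na ++ [PySem.List.pyGetD arr r 0]) := by
            simp only [pvMergeLoopA]; rw [if_pos ⟨hl, hr⟩, if_neg hcmp]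
          rw [hB, hA, ih l (r + 1) _ Sum (na ++ [PySem.List.pyGetD arr r 0]) (by omega)]
          rw [pvCredit_append]
          simp only [pvCreditB, Bool.false_eq_true, if_false]
          rw [hcnt]; ring
        · -- A's loop has already exited (left half exhausted); it stays exited at r + 1
          have hA1 : pvMergeLoopA arr mid right (fuel + 1) l r Sum na = (l, r, Sum, na) :=
            pvMergeLoopA_exit _ _ _ _ _ _ _ _ (by tauto)
          have hA2 : pvMergeLoopA arr mid right fuel l (r + 1) Sum na = (l, r + 1, Sum, na) :=
            pvMergeLoopA_exit _ _ _ _ _ _ _ _ (by tauto)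
          rw [hB, ih l (r + 1) _ Sum na (by omega)]
          rw [pvCredit_append, hA1, hA2]
          simp only [pvCreditB, Bool.false_eq_true, if_false]
          rw [hcnt]; ring
    · -- both halves exhausted: B's loop and A's loop both exit
      have hB : pvTagLoopB arr mid right (fuel + 1) l r tagged = tagged := by
        simp only [pvTagLoopB]; rw [if_neg hg]
      have hA : pvMergeLoopA arr mid right (fuel + 1) l r Sum na = (l, r, Sum, na) :=
        pvMergeLoopA_exit _ _ _ _ _ _ _ _ (by tauto)
      rw [hB, hA]
      have : ((right + 1 - r).toNat : Int) = 0 := by omega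
      rw [this]; ring

-- ===== VERDICT (by name: the statement is the Claim_ definition above) =====
theorem mergeSum_spec : Claim_equal_mergeSum := by
  intro arr left mid right _hdom _hpre
  unfold Spec_mergeSum mergeSum mergeSum_alt
  have h := pvTag_credit_eq_loopA arr mid right
    ((mid + 1 - left).toNat + (right - mid).toNat) left (mid + 1) [] 0 [] (by omega)
  simp only [List.foldl_nil] at h
  simp only [h]; ring
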